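-- pv_equiv track=rewrite | github.com/henriquedgarcia/user_dectime | assets/util.py | position2trajectory
-- ===== SOURCE A (Python) =====
-- def position2trajectory(positions: list, angles='euler'):
--     state = 0
--     old = 0
--     derived = []
--     trajectory = []
--     for n, position in enumerate(positions):
--         if n == 0:
--             old = position
--             continue
--         diff = old - position
--         derived.append(diff)
--
--         if diff > 200: state += 1
--         elif diff < -200: state -= 1
--
--         new_position = position + 360*state
--         trajectory.append(new_position)
--         old = position
--     return trajectory
-- ===== SOURCE B (Python) =====
-- from bisect import bisect_right
--
-- def position2trajectory(positions: list, angles='euler'):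
--     n = len(positions)
--     # event-index lists: where an up-wrap / down-wrap occurs
--     ups = [j for j in range(1, n) if positions[j - 1] - positions[j] > 200]
--     downs = [j for j in range(1, n) if positions[j - 1] - positions[j] < -200]
--     # each element is offset by 360 * (number of up-events at or before it minus down-events)
--     return [positions[i] + 360 * (bisect_right(ups, i) - bisect_right(downs, i))
--             for i in range(1, n)]
-- ===== Notes on version B (the rewrite author's own statement) =====
-- stated objective: alternative
-- what changed: Replaces A's single stateful loop (running wrap counter plus an unused derived list) by an event-based algorithm: build the sorted lists of up-/down-wrap indices once, then compute each output element independently as position + 360 * (bisect_right count of up-events minus down-events preceding it) - no sequential state at all.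
import Mathlib
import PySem

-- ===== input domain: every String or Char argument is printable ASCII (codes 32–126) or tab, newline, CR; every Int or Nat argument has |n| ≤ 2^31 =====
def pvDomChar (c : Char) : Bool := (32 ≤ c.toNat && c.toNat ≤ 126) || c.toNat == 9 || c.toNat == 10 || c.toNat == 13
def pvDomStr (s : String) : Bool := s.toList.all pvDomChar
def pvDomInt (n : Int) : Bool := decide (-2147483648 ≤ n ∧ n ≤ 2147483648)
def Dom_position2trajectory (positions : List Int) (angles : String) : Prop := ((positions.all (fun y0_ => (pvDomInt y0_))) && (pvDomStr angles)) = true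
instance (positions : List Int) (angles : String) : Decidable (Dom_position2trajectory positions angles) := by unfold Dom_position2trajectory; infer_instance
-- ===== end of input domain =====

-- B replaces A's stateful running-counter loop by an event-based algorithm: build the sorted up-/down-wrap index lists once, then offset each element independently by 360 * (preceding up-events minus down-events, counted with bisect); an alternative, stateless decomposition.


-- ===== PORT A =====
-- state of A's loop: (state, old, derived, trajectory)
def pvAStep (st : Int × Int × List Int × List Int) (np : Int × Int) : Int × Int × List Int × List Int :=
  let (state, old, derived, traj) := st
  let (n, position) := np
  if n = 0 then (state, position, derived, traj)
  else
    let diff := old - position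
    let derived' := derived ++ [diff]
    let state' := if diff > 200 then state + 1 else if diff < -200 then state - 1 else state
    let new_position := position + 360 * state'
    (state', position, derived', traj ++ [new_position])

def position2trajectory (positions : List Int) (_angles : String) : List Int :=
  ((PySem.List.enumerate positions).foldl pvAStep (0, 0, [], [])).2.2.2

-- ===== PORT B =====
-- bisect.bisect_right on a sorted list = number of elements ≤ x (exact here: the event-index lists are strictly increasing by construction)
def pvBisectRight (xs : List Nat) (x : Nat) : Nat := (xs.filter (fun y => y ≤ x)).length

def position2trajectory_alt (positions : List Int) (_angles : String) : List Int :=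
  let n := positions.length
  let ups := (List.range' 1 (n - 1)).filter (fun j => positions.getD (j - 1) 0 - positions.getD j 0 > 200)
  let downs := (List.range' 1 (n - 1)).filter (fun j => positions.getD (j - 1) 0 - positions.getD j 0 < -200)
  (List.range' 1 (n - 1)).map (fun i =>
    positions.getD i 0 + 360 * ((pvBisectRight ups i : Int) - (pvBisectRight downs i : Int)))

-- ===== PRECONDITION & SPEC =====
def Spec_position2trajectory (positions : List Int) (angles : String) (out : List Int) : Prop := out = position2trajectory_alt positions angles
instance (positions : List Int) (angles : String) (out : List Int) : Decidable (Spec_position2trajectory positions angles out) := by unfold Spec_position2trajectory; infer_instance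

-- ===== CLAIM (what is proved, stated in full; the proofs are below) =====
def Claim_equal_position2trajectory : Prop := ∀ (positions : List Int) (angles : String), Dom_position2trajectory positions angles → Spec_position2trajectory positions angles (position2trajectory positions angles)

-- ===== LEMMAS AND PROOFS =====

def pvJmp (d : Int) : Int := if d > 200 then 1 else if d < -200 then -1 else 0

-- net wrap count starting at index m up to index i (sum of jumps over j ∈ [m, i])
def pvSfrom (l : List Int) (m : Nat) (i : Nat) : Int :=
  ((List.range' m (i + 1 - m)).map (fun j => pvJmp (l.getD (j - 1) 0 - l.getD j 0))).sum

theorem pv_filter_sum (L : List Nat) (g : Nat → Int) :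
    (((L.filter (fun j => g j > 200)).length : Int) - ((L.filter (fun j => g j < -200)).length : Int))
      = (L.map (fun j => pvJmp (g j))).sum := by
  induction L with
  | nil => simp
  | cons x L ih =>
    simp only [List.filter_cons, List.map_cons, List.sum_cons]
    by_cases h1 : g x > 200
    · have h2 : ¬ g x < -200 := by omega
      have hx : pvJmp (g x) = 1 := by simp [pvJmp, h1]
      simp only [h1, h2, decide_true, decide_false, if_true, List.length_cons, hx]
      push_cast
      omega
    · by_cases h2 : g x < -200
      · have hx : pvJmp (g x) = -1 := by simp [pvJmp, h1, h2]
        simp only [h1, h2, decide_true, decide_false, if_true, List.length_cons, hx]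
        push_cast
        omega
      · have hx : pvJmp (g x) = 0 := by simp [pvJmp, h1, h2]
        simp only [h1, h2, decide_false, hx]
        push_cast
        omega

theorem pv_loop_eq (rest : List Int) : ∀ (l : List Int) (m : Nat) (state : Int)
    (d t : List Int), 1 ≤ m → l.drop m = rest →
    ((PySem.List.enumerate rest (m : Int)).foldl pvAStep (state, l.getD (m - 1) 0, d, t)).2.2.2
      = t ++ (List.range' m rest.length).map (fun i => l.getD i 0 + 360 * (state + pvSfrom l m i)) := by
  induction rest with
  | nil => intro l m state d t hm hdrop; simp [PySem.List.enumerate]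
  | cons p rest ih =>
    intro l m state d t hm hdrop
    have hp : l.getD m 0 = p := by
      have h0 : (l.drop m)[0]? = some p := by rw [hdrop]; rfl
      rw [List.getElem?_drop, Nat.add_zero] at h0
      rw [List.getD_eq_getElem?_getD, h0]
      rfl
    have hold : l.getD (m + 1 - 1) 0 = p := by simpa using hp
    have hdrop' : l.drop (m + 1) = rest := by
      rw [← List.tail_drop, hdrop]
      rfl
    rw [PySem.List.enumerate_cons]
    have hstep : pvAStep (state, l.getD (m - 1) 0, d, t) ((m : Int), p)
        = (state + pvJmp (l.getD (m - 1) 0 - p), p, d ++ [l.getD (m - 1) 0 - p],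
           t ++ [p + 360 * (state + pvJmp (l.getD (m - 1) 0 - p))]) := by
      simp only [pvAStep, pvJmp]
      rw [if_neg (by simpa using (by omega : ¬ m = 0))]
      split_ifs
      all_goals simp
      all_goals ring
    simp only [List.foldl_cons, hstep]
    have hmc : ((m : Int) + 1) = ((m + 1 : Nat) : Int) := by push_cast; ring
    rw [hmc, show p = l.getD (m + 1 - 1) 0 from hold.symm]
    rw [ih l (m + 1) _ _ _ (by omega) hdrop']
    have hr : List.range' m ((l.getD (m + 1 - 1) 0 :: rest).length)
        = m :: List.range' (m + 1) rest.length := by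
      simp [List.range'_succ]
    rw [hr, List.map_cons, List.append_assoc]
    congr 1
    simp only [List.singleton_append]
    congr 1
    · -- head element
      have h1 : m + 1 - m = 1 := by omega
      have hS : pvSfrom l m m = pvJmp (l.getD (m - 1) 0 - l.getD m 0) := by
        simp [pvSfrom, h1, List.range'_succ]
      rw [hS, hold, hp]
    · apply List.map_congr_left
      intro i hi
      obtain ⟨k, hk, hik⟩ := List.mem_range'.mp hi
      have hmi : m + 1 ≤ i := by omega
      have hS : pvSfrom l m i = pvJmp (l.getD (m - 1) 0 - l.getD m 0) + pvSfrom l (m + 1) i := by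
        have h1 : i + 1 - m = (i + 1 - (m + 1)) + 1 := by omega
        simp only [pvSfrom, h1, List.range'_succ, List.map_cons, List.sum_cons]
      rw [hS, hold, hp]
      ring_nf

theorem pv_filter_range_le (p : Nat → Bool) (i k : Nat) (h : i ≤ k) :
    (List.range' 1 k).filter (fun j => decide (j ≤ i) && p j) = (List.range' 1 i).filter p := by
  have hsplit : List.range' 1 k = List.range' 1 i ++ List.range' (1 + i) (k - i) := by
    have h' := (List.range'_append (s := 1) (m := i) (n := k - i) (step := 1)).symm
    simp only [Nat.one_mul, Nat.add_sub_cancel' h] at h'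
    exact h'
  rw [hsplit, List.filter_append]
  have h2 : (List.range' (1 + i) (k - i)).filter (fun j => decide (j ≤ i) && p j) = [] := by
    rw [List.filter_eq_nil_iff]
    intro a ha
    obtain ⟨k', hk', rfl⟩ := List.mem_range'.mp ha
    simp
    omega
  rw [h2, List.append_nil]
  apply List.filter_congr
  intro a ha
  obtain ⟨k', hk', rfl⟩ := List.mem_range'.mp ha
  simp
  omega

theorem pv_alt_eq (l : List Int) (angles : String) :
    position2trajectory_alt l angles
      = (List.range' 1 (l.length - 1)).map (fun i => l.getD i 0 + 360 * (0 + pvSfrom l 1 i)) := by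
  unfold position2trajectory_alt pvBisectRight
  apply List.map_congr_left
  intro i hi
  obtain ⟨k, hk, hik⟩ := List.mem_range'.mp hi
  have hle : i ≤ l.length - 1 := by omega
  rw [List.filter_filter, List.filter_filter,
      pv_filter_range_le (fun j => decide (l.getD (j - 1) 0 - l.getD j 0 > 200)) i _ hle,
      pv_filter_range_le (fun j => decide (l.getD (j - 1) 0 - l.getD j 0 < -200)) i _ hle]

  have hs : ((((List.range' 1 i).filter (fun j => decide (l.getD (j - 1) 0 - l.getD j 0 > 200))).length : Int)
      - (((List.range' 1 i).filter (fun j => decide (l.getD (j - 1) 0 - l.getD j 0 < -200))).length : Int))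
      = pvSfrom l 1 i := by
    rw [pv_filter_sum (List.range' 1 i) (fun j => l.getD (j - 1) 0 - l.getD j 0)]
    unfold pvSfrom
    norm_num
  rw [hs]
  ring_nf

theorem position2trajectory_spec' (positions : List Int) (angles : String) :
    position2trajectory positions angles = position2trajectory_alt positions angles := by
  cases positions with
  | nil => rfl
  | cons p rest =>
    rw [pv_alt_eq]
    show ((PySem.List.enumerate (p :: rest) 0).foldl pvAStep (0, 0, [], [])).2.2.2 = _
    rw [PySem.List.enumerate_cons]
    simp only [List.foldl_cons]
    have h0 : pvAStep (0, 0, [], []) (0, p) = ((0:Int), p, ([]:List Int), ([]:List Int)) := by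
      simp [pvAStep]
    rw [h0]
    have hle := pv_loop_eq rest (p :: rest) 1 0 [] [] (by omega) (by simp)
    have hget : (p :: rest).getD (1 - 1) 0 = p := rfl
    rw [hget] at hle
    rw [show ((0:Int) + 1) = ((1:Nat):Int) from by norm_num, hle]
    simp

-- ===== VERDICT (by name: the statement is the Claim_ definition above) =====
theorem position2trajectory_spec : Claim_equal_position2trajectory := by
  intro positions angles _
  exact position2trajectory_spec' positions angles
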